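-- pv_equiv track=rewrite | github.com/frtomac/ObjectDetection_PascalVoc2012 | Model/Train.py | _unpack_model_output
-- ===== SOURCE A (Python) =====
-- from typing import List, Tuple
--
-- def _unpack_model_output(
--     output: List, num_classes, grid_cols, grid_rows, num_anchors
-- ) -> Tuple[List, List, List]:
--     """Unpacks the model output vector and returns existence probabilities, box offsets and class confidences."""
--
--     assert len(output) == (1 + 4 + num_classes) * grid_rows * grid_cols * num_anchors
--
--     one_anchor_gt_len = 1 + 4 + num_classes
--
--     existence_probs = [
--         output[i * one_anchor_gt_len]
--         for i in range(0, grid_rows * grid_cols * num_anchors)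
--     ]
--     box_offsets = []
--     for i in range(0, grid_rows * grid_cols * num_anchors):
--         box_offsets.extend(
--             output[1 + i * one_anchor_gt_len : 5 + i * one_anchor_gt_len]
--         )
--     class_confs = []
--     for i in range(0, grid_rows * grid_cols * num_anchors):
--         class_confs.extend(
--             output[5 + i * one_anchor_gt_len : (i + 1) * one_anchor_gt_len]
--         )
--
--     return existence_probs, box_offsets, class_confs
-- ===== SOURCE B (Python) =====
-- from typing import List, Tuple
--
-- def _unpack_model_output(
--     output: List, num_classes, grid_cols, grid_rows, num_anchors
-- ) -> Tuple[List, List, List]: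
--     """Unpacks the model output vector and returns existence probabilities, box offsets and class confidences."""
--
--     assert len(output) == (1 + 4 + num_classes) * grid_rows * grid_cols * num_anchors
--
--     one_anchor_gt_len = 1 + 4 + num_classes
--
--     existence_probs = []
--     box_offsets = []
--     class_confs = []
--     for j, v in enumerate(output):
--         r = j % one_anchor_gt_len
--         if r == 0:
--             existence_probs.append(v)
--         elif r <= 4:
--             box_offsets.append(v)
--         else:
--             class_confs.append(v)
--
--     return existence_probs, box_offsets, class_confs
-- ===== Notes on version B (the rewrite author's own statement) =====
-- stated objective: alternative
-- what changed: Replaces A's three index-arithmetic passes over the anchor range (a comprehension plus two slice-extend loops) with a single enumerate pass over the flat output that classifies each element by its residue modulo the block length into one of the three accumulators; no slicing and no anchor-index loop remain.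
-- outside the precondition, e.g. on _unpack_model_output([1, 2, 3, 4], -3, 1, 2, 1): A returns ([1, 3], [2, 3, 4, 4], []), B returns ([1, 3], [2, 4], [])
import Mathlib
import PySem

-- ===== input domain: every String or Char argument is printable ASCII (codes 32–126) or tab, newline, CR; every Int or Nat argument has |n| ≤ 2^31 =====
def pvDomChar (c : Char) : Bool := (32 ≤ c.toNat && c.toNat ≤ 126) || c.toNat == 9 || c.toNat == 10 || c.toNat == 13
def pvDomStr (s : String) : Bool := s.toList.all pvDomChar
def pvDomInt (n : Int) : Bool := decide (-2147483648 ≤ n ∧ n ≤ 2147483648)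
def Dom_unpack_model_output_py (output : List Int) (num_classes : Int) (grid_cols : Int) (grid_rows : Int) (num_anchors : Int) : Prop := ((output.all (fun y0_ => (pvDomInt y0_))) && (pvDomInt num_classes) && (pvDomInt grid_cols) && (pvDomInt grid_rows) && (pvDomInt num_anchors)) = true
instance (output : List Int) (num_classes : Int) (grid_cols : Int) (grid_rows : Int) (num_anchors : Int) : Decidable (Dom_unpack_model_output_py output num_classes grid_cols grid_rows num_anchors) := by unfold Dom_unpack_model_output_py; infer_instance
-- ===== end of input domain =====

-- B replaces A's three slice-based passes over the anchor range by one enumerate pass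
-- over the flat output that classifies each element by its index residue modulo the
-- block length (objective: alternative single-pass algorithm, same cost).

-- ===== PORT A =====
-- literal transliteration of A: the assert is Pre_'s first conjunct; output[i] is
-- pyGetD (in range under Pre_); the comprehension and the two extend loops stay three passes.
def unpack_model_output_py (output : List Int) (num_classes : Int) (grid_cols : Int) (grid_rows : Int) (num_anchors : Int) : List Int × List Int × List Int :=
  let one_anchor_gt_len : Int := 1 + 4 + num_classes
  let existence_probs :=
    (PySem.List.pyRange 0 (grid_rows * grid_cols * num_anchors) 1).map
      (fun i => PySem.List.pyGetD output (i * one_anchor_gt_len) 0)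
  let box_offsets :=
    (PySem.List.pyRange 0 (grid_rows * grid_cols * num_anchors) 1).foldl
      (fun acc i => acc ++ PySem.List.slice output (some (1 + i * one_anchor_gt_len)) (some (5 + i * one_anchor_gt_len))) []
  let class_confs :=
    (PySem.List.pyRange 0 (grid_rows * grid_cols * num_anchors) 1).foldl
      (fun acc i => acc ++ PySem.List.slice output (some (5 + i * one_anchor_gt_len)) (some ((i + 1) * one_anchor_gt_len))) []
  (existence_probs, box_offsets, class_confs)

-- ===== PORT B =====
-- literal transliteration of B: one fold over enumerate(output) carrying the three lists;
-- each element goes to the bucket named by its index residue modulo the block length.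
def unpack_model_output_py_alt (output : List Int) (num_classes : Int) (grid_cols : Int) (grid_rows : Int) (num_anchors : Int) : List Int × List Int × List Int :=
  let one_anchor_gt_len : Int := 1 + 4 + num_classes
  (PySem.List.enumerate output).foldl
    (fun t p =>
      let r := PySem.Int.mod p.1 one_anchor_gt_len
      if r = 0 then (t.1 ++ [p.2], t.2.1, t.2.2)
      else if r ≤ 4 then (t.1, t.2.1 ++ [p.2], t.2.2)
      else (t.1, t.2.1, t.2.2 ++ [p.2]))
    ([], [], [])

-- ===== PRECONDITION & SPEC =====
-- Pre_ excludes, besides the inputs where A's assert fails or A raises IndexError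
-- (non-positive block length with a positive anchor count), the inputs with negative
-- num_classes: there the block cannot hold the mandatory 1 existence + 4 box fields and
-- A's fixed-width slice output[1+i*blk:5+i*blk] spills accidental values from the next
-- block — a corner no caller of this detector-output format would specify.
def Pre_unpack_model_output_py (output : List Int) (num_classes : Int) (grid_cols : Int) (grid_rows : Int) (num_anchors : Int) : Prop :=
  (output.length : Int) = (1 + 4 + num_classes) * grid_rows * grid_cols * num_anchors ∧
  0 ≤ num_classes
instance (output : List Int) (num_classes : Int) (grid_cols : Int) (grid_rows : Int) (num_anchors : Int) : Decidable (Pre_unpack_model_output_py output num_classes grid_cols grid_rows num_anchors) := by unfold Pre_unpack_model_output_py; infer_instance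

def pvWitness_unpack_model_output_py : List Int × Int × Int × Int × Int := ([1, 2, 3, 4, 5, 6], 1, 1, 1, 1)

def Spec_unpack_model_output_py (output : List Int) (num_classes : Int) (grid_cols : Int) (grid_rows : Int) (num_anchors : Int) (out : List Int × List Int × List Int) : Prop := out = unpack_model_output_py_alt output num_classes grid_cols grid_rows num_anchors
instance (output : List Int) (num_classes : Int) (grid_cols : Int) (grid_rows : Int) (num_anchors : Int) (out : List Int × List Int × List Int) : Decidable (Spec_unpack_model_output_py output num_classes grid_cols grid_rows num_anchors out) := by unfold Spec_unpack_model_output_py; infer_instance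

-- ===== CLAIM (what is proved, stated in full; the proofs are below) =====
def Claim_equal_unpack_model_output_py : Prop := ∀ (output : List Int) (num_classes : Int) (grid_cols : Int) (grid_rows : Int) (num_anchors : Int), Dom_unpack_model_output_py output num_classes grid_cols grid_rows num_anchors → Pre_unpack_model_output_py output num_classes grid_cols grid_rows num_anchors → Spec_unpack_model_output_py output num_classes grid_cols grid_rows num_anchors (unpack_model_output_py output num_classes grid_cols grid_rows num_anchors)

-- ===== LEMMAS AND PROOFS =====

-- the common block-recursive description both ports are reduced to (b = block length)
def pvCanon (b : ℕ) : ℕ → List Int → List Int × List Int × List Int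
  | 0, _ => ([], [], [])
  | m + 1, xs =>
    let t := pvCanon b m (xs.drop b)
    (xs.take 1 ++ t.1, (xs.drop 1).take 4 ++ t.2.1, (xs.drop 5).take (b - 5) ++ t.2.2)

-- B's loop body, named for the proofs (identical to the lambda in the port)
def pvStep (blk : Int) (t : List Int × List Int × List Int) (p : Int × Int) : List Int × List Int × List Int :=
  let r := PySem.Int.mod p.1 blk
  if r = 0 then (t.1 ++ [p.2], t.2.1, t.2.2)
  else if r ≤ 4 then (t.1, t.2.1 ++ [p.2], t.2.2)
  else (t.1, t.2.1, t.2.2 ++ [p.2])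

-- segment folds: when every index residue of a segment falls in one bucket, the fold
-- just appends the segment's values to that bucket
theorem pv_seg0 (blk : Int) (l : List (Int × Int)) (x y z : List Int)
    (h : ∀ p ∈ l, PySem.Int.mod p.1 blk = 0) :
    l.foldl (pvStep blk) (x, y, z) = (x ++ l.map (·.2), y, z) := by
  induction l generalizing x with
  | nil => simp
  | cons a t ih =>
    have ha := h a (by simp)
    have hstep : pvStep blk (x, y, z) a = (x ++ [a.2], y, z) := by simp [pvStep, ha]
    rw [List.foldl_cons, hstep, ih (x ++ [a.2]) (fun p hp => h p (List.mem_cons_of_mem _ hp))]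
    simp
theorem pv_seg1 (blk : Int) (l : List (Int × Int)) (x y z : List Int)
    (h : ∀ p ∈ l, PySem.Int.mod p.1 blk ≠ 0 ∧ PySem.Int.mod p.1 blk ≤ 4) :
    l.foldl (pvStep blk) (x, y, z) = (x, y ++ l.map (·.2), z) := by
  induction l generalizing y with
  | nil => simp
  | cons a t ih =>
    have ha := h a (by simp)
    have hstep : pvStep blk (x, y, z) a = (x, y ++ [a.2], z) := by simp [pvStep, ha.1, ha.2]
    rw [List.foldl_cons, hstep, ih (y ++ [a.2]) (fun p hp => h p (List.mem_cons_of_mem _ hp))]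
    simp
theorem pv_seg5 (blk : Int) (l : List (Int × Int)) (x y z : List Int)
    (h : ∀ p ∈ l, PySem.Int.mod p.1 blk ≠ 0 ∧ ¬ PySem.Int.mod p.1 blk ≤ 4) :
    l.foldl (pvStep blk) (x, y, z) = (x, y, z ++ l.map (·.2)) := by
  induction l generalizing z with
  | nil => simp
  | cons a t ih =>
    have ha := h a (by simp)
    have hstep : pvStep blk (x, y, z) a = (x, y, z ++ [a.2]) := by simp [pvStep, ha.1, ha.2]
    rw [List.foldl_cons, hstep, ih (z ++ [a.2]) (fun p hp => h p (List.mem_cons_of_mem _ hp))]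
    simp

-- residue of an enumerate index inside block k: (k*b + j) % b = j for j < b
theorem pv_mod_blk (b k j : ℕ) (hj : j < b) :
    PySem.Int.mod (((k * b : ℕ) : Int) + ((j : ℕ) : Int)) ((b : ℕ) : Int) = ((j : ℕ) : Int) := by
  have h1 : (((k * b : ℕ) : Int) + ((j : ℕ) : Int)) = ((j + k * b : ℕ) : Int) := by push_cast; ring
  rw [h1, PySem.Int.mod_natCast]
  have h2 : (j + k * b) % b = j % b := Nat.add_mul_mod_self_right j k b
  rw [h2, Nat.mod_eq_of_lt hj]

-- B's fold over one full block appends its three fields to the three buckets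
theorem pv_block (b : ℕ) (hb : 5 ≤ b) (c : List Int) (hc : c.length = b)
    (k : ℕ) (x y z : List Int) :
    (PySem.List.enumerate c ((k * b : ℕ) : Int)).foldl (pvStep ((b : ℕ) : Int)) (x, y, z)
      = (x ++ c.take 1, y ++ (c.drop 1).take 4, z ++ c.drop 5) := by
  have h5 : c.take 5 = c.take 1 ++ (c.drop 1).take 4 := by
    rw [show (5 : ℕ) = 1 + 4 from rfl, List.take_add]
  have hsplit : c = c.take 1 ++ ((c.drop 1).take 4 ++ c.drop 5) := by
    calc c = c.take 5 ++ c.drop 5 := (List.take_append_drop 5 c).symm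
      _ = c.take 1 ++ ((c.drop 1).take 4 ++ c.drop 5) := by rw [h5, List.append_assoc]
  have l1 : (c.take 1).length = 1 := by rw [List.length_take]; omega
  have l4 : ((c.drop 1).take 4).length = 4 := by
    rw [List.length_take, List.length_drop]; omega
  have m0 : ∀ p ∈ PySem.List.enumerate (c.take 1) ((k * b : ℕ) : Int),
      PySem.Int.mod p.1 ((b : ℕ) : Int) = 0 := by
    intro p hp
    rw [PySem.List.mem_enumerate_iff] at hp
    obtain ⟨j, hjl, rfl⟩ := hp
    rw [l1] at hjl
    have hj0 : j = 0 := by omega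
    subst hj0
    simpa using pv_mod_blk b k 0 (by omega)
  have m1 : ∀ p ∈ PySem.List.enumerate ((c.drop 1).take 4) (((k * b : ℕ) : Int) + (c.take 1).length),
      PySem.Int.mod p.1 ((b : ℕ) : Int) ≠ 0 ∧ PySem.Int.mod p.1 ((b : ℕ) : Int) ≤ 4 := by
    intro p hp
    rw [PySem.List.mem_enumerate_iff] at hp
    obtain ⟨j, hjl, rfl⟩ := hp
    rw [l4] at hjl
    simp only [l1]
    have he : ((k * b : ℕ) : Int) + ((1 : ℕ) : Int) + ((j : ℕ) : Int) = ((k * b : ℕ) : Int) + ((1 + j : ℕ) : Int) := by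
      push_cast; ring
    rw [he, pv_mod_blk b k (1 + j) (by omega)]
    constructor
    · exact_mod_cast (by omega : ¬ ((1 + j : ℕ) : Int) = 0)
    · exact_mod_cast (by omega : ((1 + j : ℕ) : Int) ≤ 4)
  have m5 : ∀ p ∈ PySem.List.enumerate (c.drop 5)
      ((((k * b : ℕ) : Int) + (c.take 1).length) + ((c.drop 1).take 4).length),
      PySem.Int.mod p.1 ((b : ℕ) : Int) ≠ 0 ∧ ¬ PySem.Int.mod p.1 ((b : ℕ) : Int) ≤ 4 := by
    intro p hp
    rw [PySem.List.mem_enumerate_iff] at hp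
    obtain ⟨j, hjl, rfl⟩ := hp
    rw [List.length_drop] at hjl
    simp only [l1, l4]
    have he : ((k * b : ℕ) : Int) + ((1 : ℕ) : Int) + ((4 : ℕ) : Int) + ((j : ℕ) : Int)
        = ((k * b : ℕ) : Int) + ((5 + j : ℕ) : Int) := by push_cast; ring
    rw [he, pv_mod_blk b k (5 + j) (by omega)]
    constructor
    · exact_mod_cast (by omega : ¬ ((5 + j : ℕ) : Int) = 0)
    · exact_mod_cast (by omega : ¬ ((5 + j : ℕ) : Int) ≤ 4)
  conv_lhs => rw [hsplit]
  rw [PySem.List.enumerate_append, PySem.List.enumerate_append,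
      List.foldl_append, List.foldl_append]
  rw [pv_seg0 _ _ x y z m0, pv_seg1 _ _ _ _ _ m1, pv_seg5 _ _ _ _ _ m5]
  simp [PySem.List.map_snd_enumerate]

-- B's fold equals the canonical block recursion
theorem pv_B_canon (b : ℕ) (hb : 5 ≤ b) (m : ℕ) :
    ∀ (xs : List Int) (k : ℕ) (x y z : List Int), xs.length = m * b →
    (PySem.List.enumerate xs ((k * b : ℕ) : Int)).foldl (pvStep ((b : ℕ) : Int)) (x, y, z)
      = (x ++ (pvCanon b m xs).1, y ++ (pvCanon b m xs).2.1, z ++ (pvCanon b m xs).2.2) := by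
  induction m with
  | zero =>
    intro xs k x y z hlen
    have : xs = [] := List.eq_nil_of_length_eq_zero (by simpa using hlen)
    subst this
    simp [pvCanon, PySem.List.enumerate_nil]
  | succ m ih =>
    intro xs k x y z hlen
    have hble : b ≤ xs.length := by rw [hlen]; nlinarith
    have hc : (xs.take b).length = b := by rw [List.length_take]; omega
    have hr : (xs.drop b).length = m * b := by rw [List.length_drop, hlen]; ring_nf; omega
    conv_lhs => rw [← List.take_append_drop b xs]
    rw [PySem.List.enumerate_append]
    rw [List.foldl_append]
    rw [pv_block b hb (xs.take b) hc k x y z]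
    have hs : ((k * b : ℕ) : Int) + (xs.take b).length = (((k + 1) * b : ℕ) : Int) := by
      rw [hc]; push_cast; ring
    rw [hs, ih (xs.drop b) (k + 1) _ _ _ hr]
    have e1 : (xs.take b).take 1 = xs.take 1 := by
      rw [List.take_take]; congr 1; omega
    have e4 : ((xs.take b).drop 1).take 4 = (xs.drop 1).take 4 := by
      rw [List.drop_take, List.take_take]
      congr 1; omega
    have e5 : (xs.take b).drop 5 = (xs.drop 5).take (b - 5) := by
      rw [List.drop_take]
    have e4t : ((xs.take b).tail).take 4 = (xs.tail).take 4 := by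
      simpa [List.drop_one] using e4
    simp [pvCanon, e1, e4t, e5, List.append_assoc]

-- A as one map plus two flatMaps over the anchor range
theorem pv_A_eq (output : List Int) (nc gc gr na : Int) :
    unpack_model_output_py output nc gc gr na =
      ((PySem.List.pyRange 0 (gr * gc * na) 1).map (fun i => PySem.List.pyGetD output (i * (1 + 4 + nc)) 0),
       (PySem.List.pyRange 0 (gr * gc * na) 1).flatMap (fun i => PySem.List.slice output (some (1 + i * (1 + 4 + nc))) (some (5 + i * (1 + 4 + nc)))),
       (PySem.List.pyRange 0 (gr * gc * na) 1).flatMap (fun i => PySem.List.slice output (some (5 + i * (1 + 4 + nc))) (some ((i + 1) * (1 + 4 + nc))))) := by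
  simp only [unpack_model_output_py]
  rw [PySem.List.foldl_append_eq_flatMap, PySem.List.foldl_append_eq_flatMap]
  simp

-- A's triple over m blocks equals the canonical block recursion
theorem pv_A_canon (b : ℕ) (hb : 5 ≤ b) (m : ℕ) :
    ∀ (xs : List Int), xs.length = m * b →
    ((PySem.List.pyRange 0 ((m : ℕ) : Int) 1).map (fun i => PySem.List.pyGetD xs (i * ((b : ℕ) : Int)) 0),
     (PySem.List.pyRange 0 ((m : ℕ) : Int) 1).flatMap (fun i => PySem.List.slice xs (some (1 + i * ((b : ℕ) : Int))) (some (5 + i * ((b : ℕ) : Int)))),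
     (PySem.List.pyRange 0 ((m : ℕ) : Int) 1).flatMap (fun i => PySem.List.slice xs (some (5 + i * ((b : ℕ) : Int))) (some ((i + 1) * ((b : ℕ) : Int)))))
      = pvCanon b m xs := by
  induction m with
  | zero =>
    intro xs hlen
    rw [PySem.List.pyRange_one_eq_nil (by norm_num)]
    simp [pvCanon]
  | succ m ih =>
    intro xs hlen
    have hble : b ≤ xs.length := by rw [hlen]; nlinarith
    have hr : (xs.drop b).length = m * b := by rw [List.length_drop, hlen]; ring_nf; omega
    have hcons : PySem.List.pyRange 0 (((m + 1 : ℕ)) : Int) 1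
        = 0 :: PySem.List.pyRange 1 ((m + 1 : ℕ) : Int) 1 := by
      rw [PySem.List.pyRange_one_cons (by exact_mod_cast Nat.succ_pos m)]
      norm_num
    have hshift : PySem.List.pyRange 1 ((m + 1 : ℕ) : Int) 1
        = (PySem.List.pyRange 0 ((m : ℕ) : Int) 1).map (fun i => i + 1) := by
      rw [PySem.List.pyRange_one, PySem.List.pyRange_one]
      have h1 : (((m + 1 : ℕ) : Int) - 1).toNat = m := by omega
      have h0 : (((m : ℕ) : Int) - 0).toNat = m := by omega
      rw [h1, h0, List.map_map]
      apply List.map_congr_left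
      intro a _
      simp
      ring
    -- the three i = 0 head terms
    have headE : [PySem.List.pyGetD xs ((0 : Int) * ((b : ℕ) : Int)) 0] = xs.take 1 := by
      have h0 : ((0 : Int) * ((b : ℕ) : Int)) = ((0 : ℕ) : Int) := by norm_num
      rw [h0, PySem.List.pyGetD_natCast]
      cases xs with
      | nil => simp at hble; omega
      | cons a t => simp [List.getD]
    have head1 : PySem.List.slice xs (some (1 + (0 : Int) * ((b : ℕ) : Int))) (some (5 + (0 : Int) * ((b : ℕ) : Int)))
        = (xs.drop 1).take 4 := by
      have h1 : (1 + (0 : Int) * ((b : ℕ) : Int)) = ((1 : ℕ) : Int) := by norm_num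
      have h5 : (5 + (0 : Int) * ((b : ℕ) : Int)) = ((5 : ℕ) : Int) := by norm_num
      rw [h1, h5, PySem.List.slice_natCast]
    have head5 : PySem.List.slice xs (some (5 + (0 : Int) * ((b : ℕ) : Int))) (some (((0 : Int) + 1) * ((b : ℕ) : Int)))
        = (xs.drop 5).take (b - 5) := by
      have h5 : (5 + (0 : Int) * ((b : ℕ) : Int)) = ((5 : ℕ) : Int) := by norm_num
      have hbb : (((0 : Int) + 1) * ((b : ℕ) : Int)) = ((b : ℕ) : Int) := by ring
      rw [h5, hbb, PySem.List.slice_natCast]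
    -- shifted terms live in the dropped tail
    have shiftE : ∀ i : Int, 0 ≤ i →
        PySem.List.pyGetD xs ((i + 1) * ((b : ℕ) : Int)) 0
          = PySem.List.pyGetD (xs.drop b) (i * ((b : ℕ) : Int)) 0 := by
      intro i hi
      obtain ⟨n, rfl⟩ : ∃ n : ℕ, i = ((n : ℕ) : Int) := ⟨i.toNat, by omega⟩
      have h1 : (((n : ℕ) : Int) + 1) * ((b : ℕ) : Int) = ((b + n * b : ℕ) : Int) := by push_cast; ring
      have h2 : ((n : ℕ) : Int) * ((b : ℕ) : Int) = ((n * b : ℕ) : Int) := by push_cast; ring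
      rw [h1, h2, PySem.List.pyGetD_natCast, PySem.List.pyGetD_natCast]
      simp [List.getD, List.getElem?_drop]
    have shiftS : ∀ (p q : ℕ) (i : Int), 0 ≤ i →
        PySem.List.slice xs (some (((p : ℕ) : Int) + (i + 1) * ((b : ℕ) : Int))) (some (((q : ℕ) : Int) + (i + 1) * ((b : ℕ) : Int)))
          = PySem.List.slice (xs.drop b) (some (((p : ℕ) : Int) + i * ((b : ℕ) : Int))) (some (((q : ℕ) : Int) + i * ((b : ℕ) : Int))) := by
      intro p q i hi
      obtain ⟨n, rfl⟩ : ∃ n : ℕ, i = ((n : ℕ) : Int) := ⟨i.toNat, by omega⟩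
      have h1 : ((p : ℕ) : Int) + (((n : ℕ) : Int) + 1) * ((b : ℕ) : Int) = ((b + (p + n * b) : ℕ) : Int) := by push_cast; ring
      have h2 : ((q : ℕ) : Int) + (((n : ℕ) : Int) + 1) * ((b : ℕ) : Int) = ((b + (q + n * b) : ℕ) : Int) := by push_cast; ring
      have h3 : ((p : ℕ) : Int) + ((n : ℕ) : Int) * ((b : ℕ) : Int) = ((p + n * b : ℕ) : Int) := by push_cast; ring
      have h4 : ((q : ℕ) : Int) + ((n : ℕ) : Int) * ((b : ℕ) : Int) = ((q + n * b : ℕ) : Int) := by push_cast; ring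
      rw [h1, h2, h3, h4, PySem.List.slice_natCast, PySem.List.slice_natCast, List.drop_drop]
      have et : b + (q + n * b) - (b + (p + n * b)) = q + n * b - (p + n * b) := by omega
      rw [et]
    rw [hcons, hshift]
    simp only [List.map_cons, List.map_map, List.flatMap_cons, List.flatMap_map, pvCanon]
    rw [← ih (xs.drop b) hr]
    refine Prod.ext ?_ (Prod.ext ?_ ?_)
    · simp only
      rw [← headE, List.singleton_append]
      congr 1
      apply List.map_congr_left
      intro a ha
      rw [PySem.List.mem_pyRange_one] at ha
      simpa using shiftE a ha.1
    · simp only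
      rw [head1]
      congr 1
      rw [List.flatMap_def, List.flatMap_def]
      apply congrArg List.flatten
      apply List.map_congr_left
      intro i hi
      rw [PySem.List.mem_pyRange_one] at hi
      simpa using shiftS 1 5 i hi.1
    · simp only
      rw [head5]
      congr 1
      rw [List.flatMap_def, List.flatMap_def]
      apply congrArg List.flatten
      apply List.map_congr_left
      intro i hi
      rw [PySem.List.mem_pyRange_one] at hi
      have h := shiftS 5 b i hi.1
      have eL : ((5 : ℕ) : Int) + (i + 1) * ((b : ℕ) : Int) = 5 + (i + 1) * ((b : ℕ) : Int) := by norm_num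
      have eLb : ((b : ℕ) : Int) + (i + 1) * ((b : ℕ) : Int) = (i + 1 + 1) * ((b : ℕ) : Int) := by ring
      have eR5 : ((5 : ℕ) : Int) + i * ((b : ℕ) : Int) = 5 + i * ((b : ℕ) : Int) := by norm_num
      have eRb : ((b : ℕ) : Int) + i * ((b : ℕ) : Int) = (i + 1) * ((b : ℕ) : Int) := by ring
      rw [eL, eLb, eR5, eRb] at h
      exact h

-- ===== VERDICT (by name: the statement is the Claim_ definition above) =====
theorem unpack_model_output_py_spec : Claim_equal_unpack_model_output_py := by
  intro output nc gc gr na _hdom hpre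
  obtain ⟨hlen, hnc⟩ := hpre
  obtain ⟨b, hb⟩ : ∃ b : ℕ, (1 + 4 + nc : Int) = ((b : ℕ) : Int) := ⟨(1 + 4 + nc).toNat, by omega⟩
  have hb5 : 5 ≤ b := by omega
  have hcnt : 0 ≤ gr * gc * na := by
    rcases lt_or_ge (gr * gc * na) 0 with h | h
    · exfalso
      have hneg : (1 + 4 + nc) * gr * gc * na < 0 := by
        have h1 : (1 + 4 + nc) * gr * gc * na = (1 + 4 + nc) * (gr * gc * na) := by ring
        rw [h1]
        exact mul_neg_of_pos_of_neg (by omega) h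
      omega
    · exact h
  obtain ⟨m, hm⟩ : ∃ m : ℕ, gr * gc * na = ((m : ℕ) : Int) := ⟨(gr * gc * na).toNat, by omega⟩
  have hlenN : output.length = m * b := by
    have h2 : (output.length : Int) = ((m * b : ℕ) : Int) := by
      rw [hlen, show (1 + 4 + nc) * gr * gc * na = (1 + 4 + nc) * (gr * gc * na) from by ring, hb, hm]
      push_cast; ring
    exact_mod_cast h2
  unfold Spec_unpack_model_output_py
  -- A side
  rw [pv_A_eq]
  rw [hm, hb]
  rw [pv_A_canon b hb5 m output hlenN]
  -- B side
  show _ = unpack_model_output_py_alt output nc gc gr na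
  have hB : unpack_model_output_py_alt output nc gc gr na
      = (PySem.List.enumerate output ((0 * b : ℕ) : Int)).foldl (pvStep ((b : ℕ) : Int)) ([], [], []) := by
    simp only [unpack_model_output_py_alt]
    rw [hb]
    norm_num
    rfl
  rw [hB, pv_B_canon b hb5 m output 0 [] [] [] hlenN]
  simp
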